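-- pv_equiv track=rewrite | github.com/bbzswcf/EvoC2rust | src/metadata_extraction/rust_metadata.py | fix_numeric_prefixes
-- ===== SOURCE A (Python) =====
-- def fix_numeric_prefixes(files: dict[str, str], declarations: dict[str, list[str]]) -> tuple[dict[str, str], dict[str, list[str]]]:
--     """检测并修复以数字开头的目录或文件名"""
--
--     number_to_word = {
--         '0': 'zero',
--         '1': 'one',
--         '2': 'two',
--         '3': 'three',
--         '4': 'four',
--         '5': 'five',
--         '6': 'six',
--         '7': 'seven',
--         '8': 'eight',
--         '9': 'nine'
--     }
--
--     def fix_path(path: str) -> str: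
--         """修复单个路径中的数字开头部分"""
--         parts = path.split('/')
--         fixed_parts = []
--
--         for part in parts:
--             if part and part[0].isdigit():
--                 i = 0
--                 while i < len(part) and part[i].isdigit():
--                     i += 1
--
--                 number_part = part[:i]
--                 remaining_part = part[i:]
--
--                 english_numbers = []
--                 for digit in number_part:
--                     english_numbers.append(number_to_word[digit])
--
--                 if remaining_part:
--                     fixed_part = '_'.join(english_numbers) + '_' + remaining_part
--                 else:
--                     fixed_part = '_'.join(english_numbers)
--
--                 fixed_parts.append(fixed_part)
--             else:
--                 fixed_parts.append(part)
--
--         return '/'.join(fixed_parts)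
--
--     fixed_files = {}
--     path_mapping = {}
--
--     for original_path, content in files.items():
--         fixed_path = fix_path(original_path)
--         fixed_files[fixed_path] = content
--         if original_path != fixed_path:
--             path_mapping[original_path] = fixed_path
--
--     fixed_declarations = {}
--     for name, path_list in declarations.items():
--         fixed_path_list = []
--         for original_path in path_list:
--             fixed_path = path_mapping.get(original_path, original_path)
--             if fixed_path == original_path:
--                 fixed_path = fix_path(original_path)
--             fixed_path_list.append(fixed_path)
--         fixed_declarations[name] = fixed_path_list
--
--     return fixed_files, fixed_declarations
-- ===== SOURCE B (Python) =====
-- def fix_numeric_prefixes(files: dict[str, str], declarations: dict[str, list[str]]) -> tuple[dict[str, str], dict[str, list[str]]]: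
--     number_to_word = {
--         '0': 'zero', '1': 'one', '2': 'two', '3': 'three', '4': 'four',
--         '5': 'five', '6': 'six', '7': 'seven', '8': 'eight', '9': 'nine'
--     }
--
--     def fix_path(path: str) -> str:
--         # single left-to-right scan: rewrite each segment's leading digit run on the fly
--         out = []
--         start = True   # at the beginning of a path segment
--         run = False    # inside the leading digit run of the current segment
--         for ch in path:
--             if ch == '/':
--                 out.append('/')
--                 start, run = True, False
--             elif start and ch.isdigit():
--                 out.append(number_to_word[ch])
--                 start, run = False, True
--             elif run and ch.isdigit():
--                 out.append('_' + number_to_word[ch])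
--             else:
--                 if run:
--                     out.append('_')
--                 out.append(ch)
--                 start, run = False, False
--         return ''.join(out)
--
--     return ({fix_path(path): content for path, content in files.items()},
--             {name: [fix_path(p) for p in paths] for name, paths in declarations.items()})
-- ===== Notes on version B (the rewrite author's own statement) =====
-- stated objective: alternative
-- what changed: B replaces A's three-stage pipeline (split path into segments, per-segment index-scan of the digit run then slice/join, plus a threaded path_mapping dict reused for declarations) by a single left-to-right character state machine over the whole path (flags: segment start / inside digit run) that emits the rewritten text on the fly, with no split/join, no slicing and no path_mapping dict (declaration paths are rewritten directly).
import Mathlib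
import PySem

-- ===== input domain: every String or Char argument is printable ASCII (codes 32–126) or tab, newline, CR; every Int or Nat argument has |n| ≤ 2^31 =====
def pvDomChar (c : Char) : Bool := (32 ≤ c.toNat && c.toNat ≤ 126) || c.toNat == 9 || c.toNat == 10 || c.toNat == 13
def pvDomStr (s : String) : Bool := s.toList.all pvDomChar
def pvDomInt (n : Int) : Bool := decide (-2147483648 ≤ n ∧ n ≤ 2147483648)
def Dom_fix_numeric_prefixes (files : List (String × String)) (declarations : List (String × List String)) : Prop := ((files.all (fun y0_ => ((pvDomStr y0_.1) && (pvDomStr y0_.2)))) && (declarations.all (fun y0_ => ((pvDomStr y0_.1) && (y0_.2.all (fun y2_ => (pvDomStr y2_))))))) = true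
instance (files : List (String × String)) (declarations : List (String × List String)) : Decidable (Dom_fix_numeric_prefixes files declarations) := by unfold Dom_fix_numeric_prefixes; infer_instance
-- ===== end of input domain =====

-- B replaces A's split-into-segments / per-segment digit-run scan / slice-and-join pipeline
-- and its threaded path_mapping dict by a single left-to-right character state machine over
-- the whole path that emits the rewritten text on the fly (objective: alternative).

-- ===== PORT A =====

-- the number_to_word table (shared literal constant of both Pythons)
def pvNumberToWord : PySem.Dict Char (List Char) := PySem.Dict.ofList
  [('0', "zero".toList), ('1', "one".toList), ('2', "two".toList), ('3', "three".toList),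
   ('4', "four".toList), ('5', "five".toList), ('6', "six".toList), ('7', "seven".toList),
   ('8', "eight".toList), ('9', "nine".toList)]

-- the 'while i < len(part) and part[i].isdigit(): i += 1' loop, as the index it produces
def pvDigitRunA : List Char → Nat
  | [] => 0
  | c :: cs => if PySem.Chars.isdigit c then pvDigitRunA cs + 1 else 0

-- the body of A's 'for part in parts' loop.  number_to_word[digit] is ported as getD with
-- a junk default: exact on Dom, where every isdigit character is an ASCII digit and the
-- key is always present (Python's KeyError is unreachable there).
def pvFixPartA (part : List Char) : List Char :=
  match part with
  | [] => part            -- 'if part …' is false: the part is appended unchanged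
  | c :: _ =>
    if PySem.Chars.isdigit c then
      let i := pvDigitRunA part
      let numberPart := part.take i        -- part[:i]  (0 ≤ i ≤ len part, so take is exact)
      let remainingPart := part.drop i     -- part[i:]
      let englishNumbers := numberPart.foldl (fun acc d => acc ++ [pvNumberToWord.getD d []]) []
      if remainingPart ≠ [] then
        PySem.Chars.join ['_'] englishNumbers ++ ['_'] ++ remainingPart
      else
        PySem.Chars.join ['_'] englishNumbers
    else part

def pvFixPathA (path : String) : String :=
  let parts := PySem.Chars.splitOn path.toList ['/']
  let fixedParts := parts.foldl (fun acc p => acc ++ [pvFixPartA p]) []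
  String.ofList (PySem.Chars.join ['/'] fixedParts)

-- body of A's first loop: state = (fixed_files, path_mapping)
def pvFilesStepA (st : PySem.Dict String String × PySem.Dict String String)
    (kv : String × String) : PySem.Dict String String × PySem.Dict String String :=
  let fixedPath := pvFixPathA kv.1
  (st.1.insert fixedPath kv.2,
   if kv.1 ≠ fixedPath then st.2.insert kv.1 fixedPath else st.2)

-- body of A's second loop, over one declaration entry
def pvDeclStepA (pm : PySem.Dict String String)
    (d : PySem.Dict String (List String)) (kv : String × List String) :
    PySem.Dict String (List String) :=
  let fixedPathList := kv.2.foldl (fun acc p =>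
      let fp := pm.getD p p
      let fp := if fp == p then pvFixPathA p else fp
      acc ++ [fp]) []
  d.insert kv.1 fixedPathList

def fix_numeric_prefixes (files : List (String × String)) (declarations : List (String × List String)) : (List (String × String)) × (List (String × List String)) :=
  let st := files.foldl pvFilesStepA (PySem.Dict.empty, PySem.Dict.empty)
  let fixedDecls := declarations.foldl (pvDeclStepA st.2) PySem.Dict.empty
  (st.1.items, fixedDecls.items)

-- ===== PORT B =====

-- body of B's 'for ch in path' loop: state = (out, start, run); out is kept as the flat
-- character list ''.join(out) produces (the appends are the same appends, in order)
def pvStepB (st : List Char × Bool × Bool) (ch : Char) : List Char × Bool × Bool :=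
  let out := st.1; let start := st.2.1; let run := st.2.2
  if ch = '/' then (out ++ ['/'], true, false)
  else if start && PySem.Chars.isdigit ch then (out ++ pvNumberToWord.getD ch [], false, true)
  else if run && PySem.Chars.isdigit ch then (out ++ '_' :: pvNumberToWord.getD ch [], start, run)
  else ((if run then out ++ ['_'] else out) ++ [ch], false, false)

def pvFixPathB (path : String) : String :=
  String.ofList (path.toList.foldl pvStepB ([], true, false)).1

def fix_numeric_prefixes_alt (files : List (String × String)) (declarations : List (String × List String)) : (List (String × String)) × (List (String × List String)) :=
  ((files.foldl (fun d kv => d.insert (pvFixPathB kv.1) kv.2) PySem.Dict.empty).items,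
   (declarations.foldl (fun d kv => d.insert kv.1 (kv.2.map pvFixPathB)) PySem.Dict.empty).items)

-- ===== PRECONDITION & SPEC =====
def Spec_fix_numeric_prefixes (files : List (String × String)) (declarations : List (String × List String)) (out : (List (String × String)) × (List (String × List String))) : Prop := out = fix_numeric_prefixes_alt files declarations
instance (files : List (String × String)) (declarations : List (String × List String)) (out : (List (String × String)) × (List (String × List String))) : Decidable (Spec_fix_numeric_prefixes files declarations out) := by unfold Spec_fix_numeric_prefixes; infer_instance

-- ===== CLAIM (what is proved, stated in full; the proofs are below) =====
def Claim_equal_fix_numeric_prefixes : Prop := ∀ (files : List (String × String)) (declarations : List (String × List String)), Dom_fix_numeric_prefixes files declarations → Spec_fix_numeric_prefixes files declarations (fix_numeric_prefixes files declarations)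

-- ===== LEMMAS AND PROOFS =====

-- abbreviations used only by the proofs
def pvW (c : Char) : List Char := pvNumberToWord.getD c []
def pvD (c : Char) : Bool := PySem.Chars.isdigit c
def pvP (c : Char) : Bool := !(c = '/')

-- B's state machine as a pure recursion on the remaining characters (flags as arguments)
def pvG : Bool → Bool → List Char → List Char
  | _, _, [] => []
  | s, r, c :: cs =>
    if c = '/' then '/' :: pvG true false cs
    else if s && pvD c then pvW c ++ pvG false true cs
    else if r && pvD c then '_' :: pvW c ++ pvG s r cs
    else (if r then ['_'] else []) ++ c :: pvG false false cs

-- the foldl of pvStepB computes pvG (first component; induction moves the accumulator out)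
theorem pv_foldl_stepB (xs : List Char) : ∀ (out : List Char) (s r : Bool),
    (xs.foldl pvStepB (out, s, r)).1 = out ++ pvG s r xs := by
  induction xs with
  | nil => intro out s r; simp [pvG]
  | cons c cs ih =>
    intro out s r
    simp only [List.foldl_cons]
    by_cases h1 : c = '/' <;> by_cases hd : PySem.Chars.isdigit c <;> cases s <;> cases r <;>
      simp [pvStepB, pvG, pvD, pvW, h1, hd, ih, List.append_assoc]

-- splitOn with separator "/" as a simple structural recursion
def pvSplit1 : List Char → List (List Char)
  | [] => [[]]
  | c :: cs => if c = '/' then [] :: pvSplit1 cs else (pvSplit1 cs).modifyHead (c :: ·)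

theorem pv_go_eq : ∀ (fuel : Nat) (l cur : List Char) (acc : List (List Char)), l.length < fuel →
    PySem.Chars.splitOn.go ['/'] fuel l cur acc
      = acc.reverse ++ (pvSplit1 l).modifyHead (cur.reverse ++ ·) := by
  intro fuel
  induction fuel with
  | zero => intro l cur acc h; omega
  | succ n ih =>
    intro l cur acc h
    match l with
    | [] => simp [PySem.Chars.splitOn.go, pvSplit1]
    | c :: rest =>
      by_cases hc : c = '/'
      · subst hc
        rw [PySem.Chars.splitOn.go]
        have hp : List.isPrefixOf ['/'] ('/' :: rest) = true := by simp [List.isPrefixOf]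
        simp only [hp, if_pos, pvSplit1, List.length_cons, List.length_nil,
          List.drop_succ_cons, List.drop_zero]
        rw [ih rest [] (List.reverse cur :: acc) (by simpa using Nat.lt_of_succ_lt_succ h)]
        simp
        cases pvSplit1 rest <;> simp
      · rw [PySem.Chars.splitOn.go]
        have hp : List.isPrefixOf ['/'] (c :: rest) = false := by
          simp [List.isPrefixOf]; intro h'; exact hc h'.symm
        simp only [hp, Bool.false_eq_true, if_false, pvSplit1, if_neg hc]
        rw [ih rest (c :: cur) acc (by simpa using Nat.lt_of_succ_lt_succ h)]
        cases pvSplit1 rest with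
        | nil => simp
        | cons a t => simp

theorem pv_splitOn_eq (s : List Char) : PySem.Chars.splitOn s ['/'] = pvSplit1 s := by
  unfold PySem.Chars.splitOn
  rw [pv_go_eq (s.length + 1) s [] [] (by omega)]
  simp
  cases pvSplit1 s <;> simp

theorem pv_split1_ne_nil (xs : List Char) : pvSplit1 xs ≠ [] := by
  cases xs with
  | nil => simp [pvSplit1]
  | cons c cs =>
    simp only [pvSplit1]
    split
    · simp
    · cases h : pvSplit1 cs with
      | nil => exact absurd h (pv_split1_ne_nil cs)
      | cons a t => simp

-- structure of pvSplit1: first segment, then the splits of what follows the first '/'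
theorem pv_split1_struct (xs : List Char) :
    pvSplit1 xs = xs.takeWhile pvP ::
      (match xs.dropWhile pvP with | [] => [] | _ :: cs => pvSplit1 cs) := by
  induction xs with
  | nil => simp [pvSplit1]
  | cons c cs ih =>
    by_cases hc : c = '/'
    · simp [pvSplit1, hc, pvP]
    · simp only [pvSplit1, if_neg hc, List.takeWhile_cons, List.dropWhile_cons]
      have hp : pvP c = true := by simp [pvP, hc]
      simp only [hp, if_pos]
      rw [ih]
      simp

-- characters: a digit is not '/', and isdigit implies pvP
theorem pv_isdigit_ne_slash (c : Char) (h : PySem.Chars.isdigit c = true) : c ≠ '/' := by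
  intro hc; subst hc; exact absurd h (by decide)

theorem pv_D_imp_P (c : Char) (h : pvD c = true) : pvP c = true := by
  simp [pvP]; exact pv_isdigit_ne_slash c h

-- A's while-loop index is the length of the isdigit prefix
theorem pv_digitRunA_eq (part : List Char) :
    pvDigitRunA part = (part.takeWhile pvD).length := by
  induction part with
  | nil => rfl
  | cons c cs ih =>
    by_cases h : pvD c <;> simp_all [pvDigitRunA, pvD]

-- pvFixPartA in takeWhile/dropWhile normal form
theorem pv_fixPartA_digit (c : Char) (cs : List Char) (h : pvD c = true) :
    pvFixPartA (c :: cs) =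
      PySem.Chars.join ['_'] (((c :: cs).takeWhile pvD).map pvW) ++
        (if (c :: cs).dropWhile pvD = [] then [] else '_' :: (c :: cs).dropWhile pvD) := by
  have htd : (c :: cs).takeWhile pvD ++ (c :: cs).dropWhile pvD = c :: cs :=
    List.takeWhile_append_dropWhile
  have htake : (c :: cs).take ((c :: cs).takeWhile pvD).length = (c :: cs).takeWhile pvD := by
    nth_rewrite 2 [← htd]; rw [List.take_left]
  have hdrop : (c :: cs).drop ((c :: cs).takeWhile pvD).length = (c :: cs).dropWhile pvD := by
    nth_rewrite 2 [← htd]; rw [List.drop_left]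
  have hD : PySem.Chars.isdigit c = true := h
  simp only [pvFixPartA, hD, if_pos, pv_digitRunA_eq, htake, hdrop,
    PySem.List.foldl_append_singleton_eq_map, List.nil_append]
  by_cases hr : (c :: cs).dropWhile pvD = [] <;> simp [hr] <;> rfl

theorem pv_fixPartA_nondigit (c : Char) (cs : List Char) (h : pvD c = false) :
    pvFixPartA (c :: cs) = c :: cs := by
  simp only [pvFixPartA]
  simp only [pvD] at h
  simp [h]

-- '_'.join of the digit words, unrolled one word
theorem pv_joinU (c : Char) (ds : List Char) :
    PySem.Chars.join ['_'] ((c :: ds).map pvW)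
      = pvW c ++ ds.flatMap (fun d => '_' :: pvW d) := by
  induction ds generalizing c with
  | nil => simp [PySem.Chars.join_singleton]
  | cons d ds' ih =>
    rw [List.map_cons, List.map_cons, PySem.Chars.join_cons_cons]
    have h := ih d
    rw [List.map_cons] at h
    rw [h]
    simp

-- heads after dropWhile fail the predicate
theorem pv_dropWhile_headP (w : List Char) (c : Char) (cs : List Char)
    (h : w.dropWhile pvP = c :: cs) : c = '/' := by
  induction w with
  | nil => simp at h
  | cons a w' ih =>
    by_cases ha : pvP a
    · rw [List.dropWhile_cons_of_pos ha] at h; exact ih h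
    · rw [List.dropWhile_cons_of_neg ha] at h
      cases h
      simpa [pvP] using ha

-- takeWhile/dropWhile exchange facts for pvD ⊆ pvP
theorem pv_takeD_takeP (cs : List Char) :
    (cs.takeWhile pvP).takeWhile pvD = cs.takeWhile pvD := by
  rw [List.takeWhile_takeWhile]
  have h : (fun a => decide (pvD a = true ∧ pvP a = true)) = pvD := by
    funext a
    by_cases h : pvD a
    · simp [h, pv_D_imp_P a h]
    · simp [h]
  rw [h]

theorem pv_dropD_takeP (cs : List Char) :
    (cs.takeWhile pvP).dropWhile pvD = (cs.dropWhile pvD).takeWhile pvP := by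
  induction cs with
  | nil => simp
  | cons a cs' ih =>
    by_cases hd : pvD a
    · have hp := pv_D_imp_P a hd
      rw [List.takeWhile_cons_of_pos hp, List.dropWhile_cons_of_pos hd,
        List.dropWhile_cons_of_pos hd, ih]
    · by_cases hp : pvP a
      · rw [List.takeWhile_cons_of_pos hp, List.dropWhile_cons_of_neg (by simp [hd]),
          List.dropWhile_cons_of_neg (by simp [hd]), List.takeWhile_cons_of_pos hp]
      · rw [List.takeWhile_cons_of_neg (by simp [hp]), List.dropWhile_cons_of_neg (by simp [hd]),
          List.takeWhile_cons_of_neg (by simp [hp])]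
        simp

theorem pv_dropP_dropD (cs : List Char) :
    (cs.dropWhile pvD).dropWhile pvP = cs.dropWhile pvP := by
  induction cs with
  | nil => simp
  | cons a cs' ih =>
    by_cases hd : pvD a
    · have hp := pv_D_imp_P a hd
      rw [List.dropWhile_cons_of_pos hd, List.dropWhile_cons_of_pos hp, ih]
    · rw [List.dropWhile_cons_of_neg (by simp [hd])]

-- the machine past the digit run of a segment copies the segment verbatim
theorem pv_g_ff (u : List Char) :
    pvG false false u = u.takeWhile pvP ++ pvG true false (u.dropWhile pvP) := by
  induction u with
  | nil => simp [pvG]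
  | cons c cs ih =>
    by_cases hc : c = '/'
    · subst hc
      rw [List.takeWhile_cons_of_neg (by simp [pvP]), List.dropWhile_cons_of_neg (by simp [pvP])]
      simp [pvG]
    · have hp : pvP c = true := by simp [pvP, hc]
      rw [List.takeWhile_cons_of_pos hp, List.dropWhile_cons_of_pos hp]
      simp [pvG, hc, ih]

-- what remains of the current segment's output when the machine is inside a digit run
def pvE (v : List Char) : List Char :=
  (match v with | [] => [] | c :: _ => if c = '/' then [] else ['_']) ++ pvG false false v

theorem pv_g_ft (u : List Char) :
    pvG false true u = (u.takeWhile pvD).flatMap (fun d => '_' :: pvW d)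
      ++ pvE (u.dropWhile pvD) := by
  induction u with
  | nil => simp [pvG, pvE]
  | cons c cs ih =>
    by_cases hd : pvD c
    · have hc : c ≠ '/' := pv_isdigit_ne_slash c hd
      rw [List.takeWhile_cons_of_pos hd, List.dropWhile_cons_of_pos hd]
      have hd' : PySem.Chars.isdigit c = true := hd
      simp [pvG, pvD, hc, hd', ih, pvW]
    · rw [List.takeWhile_cons_of_neg (by simp [hd]), List.dropWhile_cons_of_neg (by simp [hd])]
      by_cases hc : c = '/'
      · subst hc; simp [pvG, pvE]
      · have hd' : PySem.Chars.isdigit c = false := by simpa using hd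
        simp [pvG, pvD, pvE, hc, hd']

-- the tail the machine emits after a digit run, as fixPart's remainder plus the restart
theorem pv_E_eq (v : List Char) :
    pvE v = (if v.takeWhile pvP = [] then [] else '_' :: v.takeWhile pvP)
      ++ pvG true false (v.dropWhile pvP) := by
  cases v with
  | nil => simp [pvE, pvG]
  | cons x u =>
    by_cases hx : x = '/'
    · subst hx
      rw [List.takeWhile_cons_of_neg (by simp [pvP]), List.dropWhile_cons_of_neg (by simp [pvP])]
      simp [pvE, pvG]
    · have hpx : pvP x = true := by simp [pvP, hx]
      simp only [pvE, if_neg hx]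
      rw [pv_g_ff (x :: u), List.takeWhile_cons_of_pos hpx, List.dropWhile_cons_of_pos hpx]
      simp

-- a '/'-join whose first piece is empty starts with the separator
theorem pv_join_nil_cons (L : List (List Char)) (hL : L ≠ []) :
    PySem.Chars.join ['/'] ([] :: L) = '/' :: PySem.Chars.join ['/'] L := by
  cases L with
  | nil => exact absurd rfl hL
  | cons a t => rw [PySem.Chars.join_cons_cons]; simp

-- main characterisation: the state machine computes A's split/fix/join
theorem pv_g_main : ∀ (n : Nat) (xs : List Char), xs.length ≤ n →
    pvG true false xs = PySem.Chars.join ['/'] ((pvSplit1 xs).map pvFixPartA) := by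
  intro n
  induction n with
  | zero =>
    intro xs h
    have : xs = [] := List.eq_nil_of_length_eq_zero (Nat.le_zero.mp h)
    subst this; decide
  | succ n ih =>
    intro xs hlen
    cases xs with
    | nil => decide
    | cons c cs =>
      have hcs : cs.length ≤ n := by simp at hlen; omega
      by_cases hc : c = '/'
      · subst hc
        rw [show pvG true false ('/' :: cs) = '/' :: pvG true false cs from by simp [pvG]]
        rw [ih cs hcs]
        rw [show pvSplit1 ('/' :: cs) = [] :: pvSplit1 cs from by simp [pvSplit1]]
        rw [List.map_cons, show pvFixPartA [] = [] from rfl,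
          pv_join_nil_cons _ (by simp [pv_split1_ne_nil cs])]
      · have hp : pvP c = true := by simp [pvP, hc]
        have hsplit : pvSplit1 (c :: cs) = (c :: cs.takeWhile pvP) ::
            (match cs.dropWhile pvP with | [] => [] | _ :: u => pvSplit1 u) := by
          rw [pv_split1_struct (c :: cs), List.takeWhile_cons_of_pos hp,
            List.dropWhile_cons_of_pos hp]
        rw [hsplit]
        have hRHS : PySem.Chars.join ['/'] (List.map pvFixPartA ((c :: cs.takeWhile pvP) ::
              (match cs.dropWhile pvP with | [] => [] | _ :: u => pvSplit1 u)))
            = pvFixPartA (c :: cs.takeWhile pvP) ++ pvG true false (cs.dropWhile pvP) := by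
          cases hdp : cs.dropWhile pvP with
          | nil => simp [PySem.Chars.join_singleton, pvG]
          | cons x u =>
            have hx : x = '/' := pv_dropWhile_headP cs x u hdp
            subst hx
            have hu : u.length ≤ n := by
              have h1 : ('/' :: u).length ≤ cs.length := hdp ▸ List.length_dropWhile_le pvP cs
              simp at h1; omega
            have hm : (match ('/' :: u : List Char) with
                | [] => ([] : List (List Char)) | _ :: u => pvSplit1 u) = pvSplit1 u := rfl
            rw [hm, List.map_cons]
            cases hs : (pvSplit1 u).map pvFixPartA with
            | nil => exact absurd (List.map_eq_nil_iff.mp hs) (pv_split1_ne_nil u)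
            | cons a t =>
              rw [PySem.Chars.join_cons_cons]
              have hj : PySem.Chars.join ['/'] (a :: t) = pvG true false u := by
                rw [← hs, ← ih u hu]
              rw [hj]
              simp [pvG]
        rw [hRHS]
        by_cases hd : pvD c
        · have hdD : PySem.Chars.isdigit c = true := hd
          rw [show pvG true false (c :: cs) = pvW c ++ pvG false true cs from by
            simp [pvG, pvD, hc, hdD, pvW]]
          rw [pv_g_ft cs, pv_fixPartA_digit c (cs.takeWhile pvP) hd]
          rw [show (c :: cs.takeWhile pvP).takeWhile pvD = c :: cs.takeWhile pvD from by
            rw [List.takeWhile_cons_of_pos hd, pv_takeD_takeP]]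
          rw [show (c :: cs.takeWhile pvP).dropWhile pvD = (cs.dropWhile pvD).takeWhile pvP from by
            rw [List.dropWhile_cons_of_pos hd, pv_dropD_takeP]]
          rw [pv_joinU, ← pv_dropP_dropD cs, pv_E_eq]
          by_cases hv : (cs.dropWhile pvD).takeWhile pvP = [] <;> simp [hv]
        · have hdD : PySem.Chars.isdigit c = false := by simpa using hd
          rw [show pvG true false (c :: cs) = c :: pvG false false cs from by
            simp [pvG, pvD, hc, hdD]]
          rw [pv_g_ff cs, pv_fixPartA_nondigit c (cs.takeWhile pvP) (by simpa using hd)]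
          simp

-- the two path fixers agree
theorem pv_fixPath_eq (path : String) : pvFixPathA path = pvFixPathB path := by
  have hA : pvFixPathA path = String.ofList (PySem.Chars.join ['/']
      ((PySem.Chars.splitOn path.toList ['/']).map pvFixPartA)) := by
    show String.ofList (PySem.Chars.join ['/'] (List.foldl
      (fun acc p => acc ++ [pvFixPartA p]) [] (PySem.Chars.splitOn path.toList ['/']))) = _
    rw [PySem.List.foldl_append_singleton_eq_map, List.nil_append]
  rw [hA, pv_splitOn_eq, ← pv_g_main path.toList.length path.toList le_rfl]
  show _ = String.ofList (path.toList.foldl pvStepB ([], true, false)).1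
  rw [pv_foldl_stepB path.toList [] true false, List.nil_append]

-- the fixed_files dict of A is B's comprehension (path_mapping projected away)
theorem pv_files_fst (fs : List (String × String))
    (ff pm : PySem.Dict String String) :
    (fs.foldl pvFilesStepA (ff, pm)).1
      = fs.foldl (fun d kv => d.insert (pvFixPathB kv.1) kv.2) ff := by
  induction fs generalizing ff pm with
  | nil => rfl
  | cons kv rest ih =>
    simp only [List.foldl_cons, pvFilesStepA, pv_fixPath_eq]
    split <;> exact ih _ _

-- path_mapping invariant: every stored value is fix_path of its key
def pvInvPM (pm : PySem.Dict String String) : Prop :=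
  ∀ k v, pm.get? k = some v → v = pvFixPathA k

theorem pv_files_snd_inv (fs : List (String × String))
    (ff pm : PySem.Dict String String) (hpm : pvInvPM pm) :
    pvInvPM (fs.foldl pvFilesStepA (ff, pm)).2 := by
  induction fs generalizing ff pm with
  | nil => exact hpm
  | cons kv rest ih =>
    simp only [List.foldl_cons, pvFilesStepA]
    split
    · refine ih _ _ ?_
      intro k v hkv
      rw [PySem.Dict.get?_insert] at hkv
      split at hkv
      · cases hkv; subst ‹k = kv.1›; rfl
      · exact hpm k v hkv
    · exact ih _ _ hpm

-- under the invariant, A's mapping-lookup-then-recompute equals fix_path directly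
theorem pv_choose_eq (pm : PySem.Dict String String) (hpm : pvInvPM pm) (p : String) :
    (let fp := pm.getD p p
     if fp == p then pvFixPathA p else fp) = pvFixPathB p := by
  rw [← pv_fixPath_eq]
  show (if (pm.getD p p) == p then pvFixPathA p else pm.getD p p) = pvFixPathA p
  cases h : pm.get? p with
  | none => simp [PySem.Dict.getD, h]
  | some v =>
    have hv := hpm p v h
    by_cases he : v = p <;> simp [PySem.Dict.getD, h, he, hv]

theorem pv_decls_eq (pm : PySem.Dict String String) (hpm : pvInvPM pm)
    (ds : List (String × List String)) (d : PySem.Dict String (List String)) :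
    ds.foldl (pvDeclStepA pm) d
      = ds.foldl (fun d kv => d.insert kv.1 (kv.2.map pvFixPathB)) d := by
  induction ds generalizing d with
  | nil => rfl
  | cons kv rest ih =>
    have hlist : kv.2.foldl (fun acc p =>
        let fp := pm.getD p p
        let fp := if fp == p then pvFixPathA p else fp
        acc ++ [fp]) [] = kv.2.map pvFixPathB := by
      have : (fun (acc : List String) p =>
          let fp := pm.getD p p
          let fp := if fp == p then pvFixPathA p else fp
          acc ++ [fp]) = fun acc p => acc ++ [pvFixPathB p] := by
        funext acc p
        simp only
        rw [pv_choose_eq pm hpm p]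
      rw [this, PySem.List.foldl_append_singleton_eq_map, List.nil_append]
    simp only [List.foldl_cons, pvDeclStepA, hlist]
    exact ih _

-- ===== VERDICT (by name: the statement is the Claim_ definition above) =====
theorem fix_numeric_prefixes_spec : Claim_equal_fix_numeric_prefixes := by
  intro files declarations _
  show fix_numeric_prefixes files declarations = fix_numeric_prefixes_alt files declarations
  unfold fix_numeric_prefixes fix_numeric_prefixes_alt
  have hinv : pvInvPM (files.foldl pvFilesStepA (PySem.Dict.empty, PySem.Dict.empty)).2 :=
    pv_files_snd_inv files _ _ (by intro k v h; rw [PySem.Dict.get?_empty] at h; cases h)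
  simp only [pv_files_fst, pv_decls_eq _ hinv]
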